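-- pv_equiv track=rewrite | github.com/eastgrand/re-microservice | query_aware_analysis.py | get_relevant_features_by_intent
-- ===== SOURCE A (Python) =====
-- from typing import List, Dict, Tuple
--
-- def get_relevant_features_by_intent(intent: Dict, all_features: List[str]) -> List[str]:
--     """Get features most relevant to the user's intent"""
--
--     relevant_features = []
--     focus_areas = intent['focus_areas']
--     key_concepts = intent.get('key_concepts', [])
--
--     # First, identify specific concepts mentioned in the query
--     specific_concepts = set()
--     for concept in key_concepts:
--         if 'diversity' in concept.lower():
--             specific_concepts.update(['visible minority', 'population diversity'])
--         elif 'income' in concept.lower():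
--             specific_concepts.update(['income', 'household income', 'discretionary income'])
--         elif 'housing' in concept.lower():
--             specific_concepts.update(['housing', 'structure type', 'tenure'])
--         elif 'conversion' in concept.lower():
--             specific_concepts.update(['conversion rate', 'mortgage approval'])
--
--     # Then, select features based on both focus areas and specific concepts
--     if 'demographic' in focus_areas:
--         # Only include demographic features that match specific concepts
--         demo_features = []
--         for f in all_features:
--             f_lower = f.lower()
--             # Check if feature matches any specific concepts
--             if any(concept in f_lower for concept in specific_concepts):
--                 demo_features.append(f)
--             # If no specific concepts, use broader matching
--             elif not specific_concepts and any(x in f_lower for x in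
--                     ['visible minority', 'population', 'age', 'married', 'divorced', 'single', 'maintainer']):
--                 demo_features.append(f)
--         relevant_features.extend(demo_features)
--
--     if 'geographic' in focus_areas:
--         # Only include geographic features that match specific concepts
--         geo_features = []
--         for f in all_features:
--             f_lower = f.lower()
--             if any(concept in f_lower for concept in specific_concepts):
--                 geo_features.append(f)
--             elif not specific_concepts and any(x in f_lower for x in
--                    ['housing', 'construction', 'tenure', 'structure', 'condominium', 'apartment']):
--                 geo_features.append(f)
--         relevant_features.extend(geo_features)
--
--     if 'financial' in focus_areas:
--         # Only include financial features that match specific concepts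
--         fin_features = []
--         for f in all_features:
--             f_lower = f.lower()
--             if any(concept in f_lower for concept in specific_concepts):
--                 fin_features.append(f)
--             elif not specific_concepts and any(x in f_lower for x in
--                    ['income', 'mortgage', 'property', 'employment', 'financial', 'shelter', 'tax']):
--                 fin_features.append(f)
--         relevant_features.extend(fin_features)
--
--     # If no specific focus or no features found, return top features by importance
--     if not relevant_features:
--         relevant_features = all_features
--
--     # Remove duplicates and return
--     return list(set(relevant_features))
-- ===== SOURCE B (Python) =====
-- def get_relevant_features_by_intent(intent, all_features):
--     """Single pass over all_features with a precomputed keyword list; returns the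
--     same set of features (output order of list(set(...)) is unspecified; here sorted)."""
--     focus_areas = intent['focus_areas']
--     key_concepts = intent.get('key_concepts', [])
--
--     concept_map = [
--         ('diversity', ['visible minority', 'population diversity']),
--         ('income', ['income', 'household income', 'discretionary income']),
--         ('housing', ['housing', 'structure type', 'tenure']),
--         ('conversion', ['conversion rate', 'mortgage approval']),
--     ]
--     concepts = []
--     for c in key_concepts:
--         cl = c.lower()
--         for trigger, words in concept_map:
--             if trigger in cl:
--                 concepts.extend(words)
--                 break
--
--     area_map = [
--         ('demographic', ['visible minority', 'population', 'age', 'married',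
--                          'divorced', 'single', 'maintainer']),
--         ('geographic', ['housing', 'construction', 'tenure', 'structure',
--                         'condominium', 'apartment']),
--         ('financial', ['income', 'mortgage', 'property', 'employment',
--                        'financial', 'shelter', 'tax']),
--     ]
--     broad = [w for area, words in area_map if area in focus_areas for w in words]
--     active = any(area in focus_areas for area, _ in area_map)
--
--     keys = concepts if concepts else broad
--     picked = [f for f in all_features
--               if active and any(k in f.lower() for k in keys)]
--     if not picked:
--         picked = all_features
--     return sorted(set(picked))
-- ===== Notes on version B (the rewrite author's own statement) =====
-- stated objective: alternative
-- what changed: One single pass over all_features testing a precomputed keyword list (active broad keywords or concepts) instead of three separate per-area scans concatenated, with a deterministic sorted output in place of hash-ordered list(set(...)); Pre_ only excludes intents without a 'focus_areas' key, where both A and B raise KeyError.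
import Mathlib
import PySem

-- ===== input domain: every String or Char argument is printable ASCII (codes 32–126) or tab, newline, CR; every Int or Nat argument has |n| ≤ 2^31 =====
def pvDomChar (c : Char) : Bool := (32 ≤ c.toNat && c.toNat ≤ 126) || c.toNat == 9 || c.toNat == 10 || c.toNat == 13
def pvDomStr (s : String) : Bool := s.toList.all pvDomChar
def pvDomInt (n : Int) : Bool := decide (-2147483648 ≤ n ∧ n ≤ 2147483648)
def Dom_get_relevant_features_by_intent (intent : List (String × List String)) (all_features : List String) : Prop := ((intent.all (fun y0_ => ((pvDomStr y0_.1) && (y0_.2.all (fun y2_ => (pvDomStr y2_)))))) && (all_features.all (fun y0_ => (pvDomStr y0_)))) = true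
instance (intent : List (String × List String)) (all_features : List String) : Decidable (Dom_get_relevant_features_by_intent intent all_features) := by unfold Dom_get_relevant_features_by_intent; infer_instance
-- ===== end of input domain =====

-- B makes one pass over all_features with a precomputed keyword list instead of A's three per-area
-- scans; both return the same SET of features (Python's list(set(...)) order is hash-arbitrary and
-- the output is compared as a set, so both ports return the sorted distinct elements).

-- ===== PORT A =====
-- broad keyword lists, verbatim from A
def pvDemoKeys : List String := ["visible minority", "population", "age", "married", "divorced", "single", "maintainer"]
def pvGeoKeys : List String := ["housing", "construction", "tenure", "structure", "condominium", "apartment"]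
def pvFinKeys : List String := ["income", "mortgage", "property", "employment", "financial", "shelter", "tax"]

-- A's 'for concept in key_concepts' loop building the set specific_concepts
def pvSpecificConcepts (key_concepts : List String) : PySem.Set String :=
  key_concepts.foldl (fun s concept =>
    let cl := PySem.Str.lower concept
    if PySem.Str.isIn "diversity" cl then PySem.Set.update s ["visible minority", "population diversity"]
    else if PySem.Str.isIn "income" cl then PySem.Set.update s ["income", "household income", "discretionary income"]
    else if PySem.Str.isIn "housing" cl then PySem.Set.update s ["housing", "structure type", "tenure"]
    else if PySem.Str.isIn "conversion" cl then PySem.Set.update s ["conversion rate", "mortgage approval"]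
    else s) PySem.Set.empty

-- A's per-area loop: append f when a specific concept matches, elif (no concepts) a broad keyword matches
def pvAreaLoop (specific_concepts : PySem.Set String) (keys : List String) (all_features : List String) : List String :=
  all_features.foldl (fun acc f =>
    let f_lower := PySem.Str.lower f
    if specific_concepts.any (fun c => PySem.Str.isIn c f_lower) then acc ++ [f]
    else if specific_concepts.isEmpty && keys.any (fun x => PySem.Str.isIn x f_lower) then acc ++ [f]
    else acc) []

def get_relevant_features_by_intent (intent : List (String × List String)) (all_features : List String) : List String :=
  -- intent['focus_areas'] raises KeyError when the key is absent: excluded by Pre_; .getD [] there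
  let focus_areas := (PySem.Dict.get? (PySem.Dict.mk intent) "focus_areas").getD []
  let key_concepts := PySem.Dict.getD (PySem.Dict.mk intent) "key_concepts" []
  let specific_concepts := pvSpecificConcepts key_concepts
  let relevant_features :=
    (if focus_areas.contains "demographic" then pvAreaLoop specific_concepts pvDemoKeys all_features else []) ++
    (if focus_areas.contains "geographic" then pvAreaLoop specific_concepts pvGeoKeys all_features else []) ++
    (if focus_areas.contains "financial" then pvAreaLoop specific_concepts pvFinKeys all_features else [])
  let relevant_features := if relevant_features = [] then all_features else relevant_features
  -- list(set(relevant_features)): hash order, unspecified — returned as the sorted distinct elements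
  PySem.List.sorted (PySem.Set.ofList relevant_features) (fun x => x) false

-- ===== PORT B =====
def pvConceptMap : List (String × List String) :=
  [("diversity", ["visible minority", "population diversity"]),
   ("income", ["income", "household income", "discretionary income"]),
   ("housing", ["housing", "structure type", "tenure"]),
   ("conversion", ["conversion rate", "mortgage approval"])]

def pvAreaMap : List (String × List String) :=
  [("demographic", pvDemoKeys), ("geographic", pvGeoKeys), ("financial", pvFinKeys)]

-- B's concept loop: first matching trigger contributes its words (for …: if trigger in cl: extend; break)
def pvConceptsB (key_concepts : List String) : List String :=
  key_concepts.foldl (fun acc c =>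
    let cl := PySem.Str.lower c
    match pvConceptMap.find? (fun tw => PySem.Str.isIn tw.1 cl) with
    | some tw => acc ++ tw.2
    | none => acc) []

def get_relevant_features_by_intent_alt (intent : List (String × List String)) (all_features : List String) : List String :=
  let focus_areas := (PySem.Dict.get? (PySem.Dict.mk intent) "focus_areas").getD []   -- KeyError outside Pre_
  let key_concepts := PySem.Dict.getD (PySem.Dict.mk intent) "key_concepts" []
  let concepts := pvConceptsB key_concepts
  let broad := (pvAreaMap.filter (fun aw => focus_areas.contains aw.1)).flatMap (fun aw => aw.2)
  let active := pvAreaMap.any (fun aw => focus_areas.contains aw.1)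
  let keys := if concepts = [] then broad else concepts
  let picked := all_features.filter (fun f => active && keys.any (fun k => PySem.Str.isIn k (PySem.Str.lower f)))
  let picked := if picked = [] then all_features else picked
  PySem.List.sorted (PySem.Set.ofList picked) (fun x => x) false   -- sorted(set(picked))

-- ===== PRECONDITION & SPEC =====
-- Pre_ excludes exactly the intents without a 'focus_areas' key, on which A (and B) raise KeyError.
def Pre_get_relevant_features_by_intent (intent : List (String × List String)) (all_features : List String) : Prop :=
  (PySem.Dict.get? (PySem.Dict.mk intent) "focus_areas").isSome = true
instance (intent : List (String × List String)) (all_features : List String) : Decidable (Pre_get_relevant_features_by_intent intent all_features) := by unfold Pre_get_relevant_features_by_intent; infer_instance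

def pvWitness_get_relevant_features_by_intent : (List (String × List String)) × List String :=
  ([("focus_areas", ["demographic"])], ["Age of pop", "tax rate"])

def Spec_get_relevant_features_by_intent (intent : List (String × List String)) (all_features : List String) (out : List String) : Prop := out = get_relevant_features_by_intent_alt intent all_features
instance (intent : List (String × List String)) (all_features : List String) (out : List String) : Decidable (Spec_get_relevant_features_by_intent intent all_features out) := by unfold Spec_get_relevant_features_by_intent; infer_instance

-- ===== CLAIM (what is proved, stated in full; the proofs are below) =====
def Claim_equal_get_relevant_features_by_intent : Prop := ∀ (intent : List (String × List String)) (all_features : List String), Dom_get_relevant_features_by_intent intent all_features → Pre_get_relevant_features_by_intent intent all_features → Spec_get_relevant_features_by_intent intent all_features (get_relevant_features_by_intent intent all_features)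

-- ===== LEMMAS AND PROOFS =====

-- A's specific_concepts set and B's concepts list hold the same strings
theorem mem_specific_iff (key_concepts : List String) (x : String) :
    x ∈ pvSpecificConcepts key_concepts ↔ x ∈ pvConceptsB key_concepts := by
  unfold pvSpecificConcepts pvConceptsB
  suffices h : ∀ (kcs : List String) (s : PySem.Set String) (l : List String),
      (∀ y, y ∈ s ↔ y ∈ l) →
      ∀ y, y ∈ kcs.foldl (fun s concept =>
        let cl := PySem.Str.lower concept
        if PySem.Str.isIn "diversity" cl then PySem.Set.update s ["visible minority", "population diversity"]
        else if PySem.Str.isIn "income" cl then PySem.Set.update s ["income", "household income", "discretionary income"]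
        else if PySem.Str.isIn "housing" cl then PySem.Set.update s ["housing", "structure type", "tenure"]
        else if PySem.Str.isIn "conversion" cl then PySem.Set.update s ["conversion rate", "mortgage approval"]
        else s) s ↔ y ∈ kcs.foldl (fun acc c =>
        let cl := PySem.Str.lower c
        match pvConceptMap.find? (fun tw => PySem.Str.isIn tw.1 cl) with
        | some tw => acc ++ tw.2
        | none => acc) l by
    exact h key_concepts PySem.Set.empty [] (by simp [PySem.Set.empty]) x
  intro kcs
  induction kcs with
  | nil => intro s l h y; simpa using h y
  | cons c rest ih =>
    intro s l h y
    simp only [List.foldl_cons]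
    apply ih
    intro z
    simp only [pvConceptMap, List.find?]
    by_cases h1 : PySem.Chars.isIn ['d','i','v','e','r','s','i','t','y'] (PySem.Chars.lower c.toList) = true <;>
    by_cases h2 : PySem.Chars.isIn ['i','n','c','o','m','e'] (PySem.Chars.lower c.toList) = true <;>
    by_cases h3 : PySem.Chars.isIn ['h','o','u','s','i','n','g'] (PySem.Chars.lower c.toList) = true <;>
    by_cases h4 : PySem.Chars.isIn ['c','o','n','v','e','r','s','i','o','n'] (PySem.Chars.lower c.toList) = true <;>
    simp [h1, h2, h3, h4, PySem.Set.mem_update, h z, or_assoc]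

-- A's per-area loop is a filter
theorem pvAreaLoop_eq_filter (s : PySem.Set String) (keys : List String) (fs : List String) :
    pvAreaLoop s keys fs = fs.filter (fun f =>
      s.any (fun c => PySem.Str.isIn c (PySem.Str.lower f)) ||
      (s.isEmpty && keys.any (fun x => PySem.Str.isIn x (PySem.Str.lower f)))) := by
  unfold pvAreaLoop
  suffices h : ∀ (fs : List String) (acc : List String),
      fs.foldl (fun acc f =>
        let f_lower := PySem.Str.lower f
        if s.any (fun c => PySem.Str.isIn c f_lower) then acc ++ [f]
        else if s.isEmpty && keys.any (fun x => PySem.Str.isIn x f_lower) then acc ++ [f]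
        else acc) acc = acc ++ fs.filter (fun f =>
          s.any (fun c => PySem.Str.isIn c (PySem.Str.lower f)) ||
          (s.isEmpty && keys.any (fun x => PySem.Str.isIn x (PySem.Str.lower f)))) by
    simpa using h fs []
  intro fs
  induction fs with
  | nil => simp
  | cons f rest ih =>
    intro acc
    simp only [List.foldl_cons, List.filter_cons]
    by_cases h1 : s.any (fun c => PySem.Str.isIn c (PySem.Str.lower f)) = true
    · rw [if_pos h1, ih]
      simp only [h1, Bool.true_or, if_pos]
      simp
    · rw [Bool.not_eq_true] at h1
      by_cases h2 : (s.isEmpty && keys.any (fun x => PySem.Str.isIn x (PySem.Str.lower f))) = true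
      · rw [if_neg (by rw [h1]; simp), if_pos h2, ih]
        simp only [h1, h2, Bool.false_or, if_pos]
        simp
      · rw [Bool.not_eq_true] at h2
        rw [if_neg (by rw [h1]; simp), if_neg (by rw [h2]; simp), ih,
          if_neg (by rw [h1, h2]; simp)]

-- same elements ⇒ same sorted distinct list
theorem sorted_ofList_congr (X Y : List String) (h : ∀ x, x ∈ X ↔ x ∈ Y) :
    PySem.List.sorted (PySem.Set.ofList X) (fun x => x) false
      = PySem.List.sorted (PySem.Set.ofList Y) (fun x => x) false := by
  refine PySem.List.sorted_eq_sorted_of_perm _ _ _ (fun a b hab => hab) ?_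
  rw [List.perm_ext_iff_of_nodup (PySem.Set.nodup_ofList X) (PySem.Set.nodup_ofList Y)]
  intro a; simp only [PySem.Set.mem_ofList]; exact h a

-- membership in A's concatenation of per-area lists = membership in B's single filter
set_option maxHeartbeats 1000000 in
theorem mem_rel (fa all s concepts : List String)
    (hmem : ∀ x, x ∈ s ↔ x ∈ concepts) (y : String) :
    (y ∈ (if fa.contains "demographic" then pvAreaLoop s pvDemoKeys all else []) ++
         (if fa.contains "geographic" then pvAreaLoop s pvGeoKeys all else []) ++
         (if fa.contains "financial" then pvAreaLoop s pvFinKeys all else []))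
    ↔ y ∈ all.filter (fun f =>
        (pvAreaMap.any (fun aw => fa.contains aw.1)) &&
        (if concepts = [] then (pvAreaMap.filter (fun aw => fa.contains aw.1)).flatMap (fun aw => aw.2)
         else concepts).any (fun k => PySem.Str.isIn k (PySem.Str.lower f))) := by
  have hempty : (s = []) ↔ (concepts = []) := by
    rw [List.eq_nil_iff_forall_not_mem, List.eq_nil_iff_forall_not_mem]
    exact forall_congr' fun z => not_congr (hmem z)
  have hany : ∀ (g : String), (∃ c ∈ s, PySem.Str.isIn c (PySem.Str.lower g) = true)
      ↔ (∃ c ∈ concepts, PySem.Str.isIn c (PySem.Str.lower g) = true) := by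
    intro g
    constructor
    · rintro ⟨c, hc, hcin⟩; exact ⟨c, (hmem c).mp hc, hcin⟩
    · rintro ⟨c, hc, hcin⟩; exact ⟨c, (hmem c).mpr hc, hcin⟩
  rw [pvAreaLoop_eq_filter, pvAreaLoop_eq_filter, pvAreaLoop_eq_filter]
  by_cases hce : concepts = []
  · have hs0 : s = [] := hempty.mpr hce
    subst hs0
    by_cases hcd : fa.contains "demographic" = true <;>
    by_cases hcg : fa.contains "geographic" = true <;>
    by_cases hcf : fa.contains "financial" = true <;>
    simp only [pvAreaMap, hcd, hcg, hcf, hce, if_true, if_false, Bool.false_eq_true,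
      List.any_cons, List.any_nil, List.filter_cons, List.filter_nil, List.flatMap_cons,
      List.flatMap_nil, List.mem_append, List.mem_filter, List.any_eq_true,
      List.isEmpty_nil, Bool.true_and, Bool.false_and, Bool.and_true, Bool.and_false,
      Bool.or_false, Bool.false_or, Bool.true_or, Bool.or_eq_true, Bool.and_eq_true,
      List.not_mem_nil, List.append_nil, List.nil_append, false_and, and_false, or_false,
      false_or, exists_false, List.any_append, and_or_left, or_assoc, or_self]
  · have hs0 : ¬ (s = []) := fun h => hce (hempty.mp h)
    have hie : s.isEmpty = false := by simpa [List.isEmpty_iff] using hs0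
    by_cases hcd : fa.contains "demographic" = true <;>
    by_cases hcg : fa.contains "geographic" = true <;>
    by_cases hcf : fa.contains "financial" = true <;>
    simp only [pvAreaMap, hcd, hcg, hcf, hce, hie, if_true, if_false, Bool.false_eq_true,
      List.any_cons, List.any_nil, List.filter_cons, List.filter_nil,
      List.mem_append, List.mem_filter, List.any_eq_true,
      Bool.true_and, Bool.false_and, Bool.and_true, Bool.and_false,
      Bool.or_false, Bool.false_or, Bool.true_or, Bool.or_eq_true, Bool.and_eq_true,
      List.not_mem_nil, List.append_nil, List.nil_append, false_and, and_false, or_false,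
      false_or, exists_false, hany, and_or_left, or_assoc, or_self]

-- ===== VERDICT (by name: the statement is the Claim_ definition above) =====
theorem get_relevant_features_by_intent_spec : Claim_equal_get_relevant_features_by_intent := by
  intro intent all_features _ _
  unfold Spec_get_relevant_features_by_intent
  simp only [get_relevant_features_by_intent, get_relevant_features_by_intent_alt]
  set fa := (PySem.Dict.get? (PySem.Dict.mk intent) "focus_areas").getD [] with hfa
  set kc := PySem.Dict.getD (PySem.Dict.mk intent) "key_concepts" [] with hkc
  set s := pvSpecificConcepts kc with hs
  set concepts := pvConceptsB kc with hconcepts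
  have hA := mem_rel fa all_features s concepts (mem_specific_iff kc)
  set relA := (if fa.contains "demographic" then pvAreaLoop s pvDemoKeys all_features else []) ++
      (if fa.contains "geographic" then pvAreaLoop s pvGeoKeys all_features else []) ++
      (if fa.contains "financial" then pvAreaLoop s pvFinKeys all_features else []) with hrelA
  set picked := all_features.filter (fun f =>
      (pvAreaMap.any (fun aw => fa.contains aw.1)) &&
      (if concepts = [] then (pvAreaMap.filter (fun aw => fa.contains aw.1)).flatMap (fun aw => aw.2)
       else concepts).any (fun k => PySem.Str.isIn k (PySem.Str.lower f))) with hpicked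
  have hEmpties : (relA = []) ↔ (picked = []) := by
    rw [List.eq_nil_iff_forall_not_mem, List.eq_nil_iff_forall_not_mem]
    exact forall_congr' fun y => not_congr (hA y)
  apply sorted_ofList_congr
  intro x
  by_cases hn : relA = []
  · rw [if_pos hn, if_pos (hEmpties.mp hn)]
  · rw [if_neg hn, if_neg (fun hc => hn (hEmpties.mpr hc))]
    exact hA x
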